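-- pv_equiv track=rewrite | github.com/TheJoshBrod/KernelForge | src/generator/prompts/prompts.py | _merge_dynamic_dims
-- ===== SOURCE A (Python) =====
-- def _merge_dynamic_dims(values_list):
--     if not values_list:
--         return []
--     ref = list(values_list[0])
--     dynamic = list(ref)
--     for val in values_list[1:]:
--         if len(val) != len(ref):
--             return "Rank Varies"
--         for i, dim in enumerate(val):
--             if dim != dynamic[i]:
--                 dynamic[i] = -1
--     return dynamic
-- ===== SOURCE B (Python) =====
-- def _merge_dynamic_dims(values_list):
--     if not values_list:
--         return []
--     ref = list(values_list[0])
--     for val in values_list[1:]: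
--         if len(val) != len(ref):
--             return "Rank Varies"
--     return [ref[i] if all(v[i] == ref[i] for v in values_list) else -1
--             for i in range(len(ref))]
-- ===== Notes on version B (the rewrite author's own statement) =====
-- stated objective: simpler
-- what changed: Replaces the interleaved row-major pass that mutates a running 'dynamic' copy with a separate rank-validation pass followed by a column-wise list comprehension that emits ref[i] when every shape agrees at position i and -1 otherwise (column merge done by the interpreter-level all() instead of per-element Python-level branch-and-assign).
-- outside the precondition, e.g. on _merge_dynamic_dims([[1], [2, 3]]): A returns 'Rank Varies', B returns 'Rank Varies'
import Mathlib
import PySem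

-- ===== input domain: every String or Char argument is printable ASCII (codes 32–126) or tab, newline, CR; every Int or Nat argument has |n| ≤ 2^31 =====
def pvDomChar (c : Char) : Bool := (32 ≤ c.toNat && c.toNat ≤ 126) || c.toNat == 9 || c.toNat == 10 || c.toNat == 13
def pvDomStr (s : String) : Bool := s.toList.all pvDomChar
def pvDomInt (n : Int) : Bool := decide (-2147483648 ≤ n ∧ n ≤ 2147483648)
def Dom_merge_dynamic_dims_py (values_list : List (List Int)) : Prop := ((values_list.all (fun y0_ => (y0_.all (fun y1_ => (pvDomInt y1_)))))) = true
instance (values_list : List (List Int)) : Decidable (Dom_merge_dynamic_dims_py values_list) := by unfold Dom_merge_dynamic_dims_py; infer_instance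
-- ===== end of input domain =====

-- B separates rank validation from the merge and builds the result column-wise (simpler decomposition; same cost).

-- ===== PORT A =====
-- inner loop: `for i, dim in enumerate(val): if dim != dynamic[i]: dynamic[i] = -1`
-- (dynamic[i] read via getD; under Pre_ the index i is always in range, as it is in the Python)
def pvInnerA (dynamic : List Int) (val : List Int) (i : Nat) : List Int :=
  match val with
  | [] => dynamic
  | dim :: rest =>
    pvInnerA (if dim ≠ dynamic.getD i 0 then dynamic.set i (-1) else dynamic) rest (i + 1)

-- outer loop: `for val in values_list[1:]`
def pvOuterA (ref : List Int) (dynamic : List Int) (rest : List (List Int)) : List Int :=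
  match rest with
  | [] => dynamic
  | val :: rest' =>
    if val.length ≠ ref.length then []   -- Python returns the string "Rank Varies" here (not a List Int); excluded by Pre_
    else pvOuterA ref (pvInnerA dynamic val 0) rest'

def merge_dynamic_dims_py (values_list : List (List Int)) : List Int :=
  match values_list with
  | [] => []
  | v0 :: rest => pvOuterA v0 v0 rest

-- ===== PORT B =====
def merge_dynamic_dims_py_alt (values_list : List (List Int)) : List Int :=
  match values_list with
  | [] => []
  | ref :: rest =>
    if rest.any (fun v => v.length ≠ ref.length) then []   -- Python returns "Rank Varies" here; excluded by Pre_
    else (List.range ref.length).map (fun i =>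
      if (ref :: rest).all (fun v => v.getD i 0 = ref.getD i 0) then ref.getD i 0 else -1)

-- ===== PRECONDITION & SPEC =====
-- Pre_ excludes ragged inputs (some shape's rank differs from the first's), on which Python A
-- returns the string "Rank Varies" — not a value of the declared List Int return type.
def Pre_merge_dynamic_dims_py (values_list : List (List Int)) : Prop :=
  ∀ v ∈ values_list, v.length = (values_list.headD []).length
instance (values_list : List (List Int)) : Decidable (Pre_merge_dynamic_dims_py values_list) := by
  unfold Pre_merge_dynamic_dims_py; infer_instance

def pvWitness_merge_dynamic_dims_py : List (List Int) := [[2, 3, 4], [2, 5, 4], [2, 7, 4]]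

def Spec_merge_dynamic_dims_py (values_list : List (List Int)) (out : List Int) : Prop := out = merge_dynamic_dims_py_alt values_list
instance (values_list : List (List Int)) (out : List Int) : Decidable (Spec_merge_dynamic_dims_py values_list out) := by unfold Spec_merge_dynamic_dims_py; infer_instance

-- ===== CLAIM (what is proved, stated in full; the proofs are below) =====
def Claim_equal_merge_dynamic_dims_py : Prop := ∀ (values_list : List (List Int)), Dom_merge_dynamic_dims_py values_list → Pre_merge_dynamic_dims_py values_list → Spec_merge_dynamic_dims_py values_list (merge_dynamic_dims_py values_list)

-- ===== LEMMAS AND PROOFS =====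

-- the elementwise effect of one step of A's inner loop on one cell
def pvG (s x : Int) : Int := if x ≠ s then -1 else s

-- A's inner loop, started past an already-processed prefix, acts cellwise as pvG
theorem pvInnerA_zip : ∀ (val pre cur : List Int), cur.length = val.length →
    pvInnerA (pre ++ cur) val pre.length = pre ++ List.zipWith pvG cur val := by
  intro val
  induction val with
  | nil =>
    intro pre cur h
    cases cur
    · simp [pvInnerA]
    · simp at h
  | cons dim rest ih =>
    intro pre cur h
    cases cur with
    | nil => simp at h
    | cons c cur' =>
      have hget : (pre ++ c :: cur').getD pre.length 0 = c := by simp [List.getD]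
      have hset : (pre ++ c :: cur').set pre.length (-1) = pre ++ (-1) :: cur' := by
        rw [List.set_append]; simp
      simp only [pvInnerA, hget, hset, List.zipWith]
      by_cases hd : dim = c
      · simp only [hd, ne_eq, not_true_eq_false, if_false, pvG]
        have := ih (pre ++ [c]) cur' (by simpa using h)
        simpa using this
      · simp only [ne_eq, hd, not_false_eq_true, if_true, pvG]
        have := ih (pre ++ [(-1 : Int)]) cur' (by simpa using h)
        simpa using this

-- folding pvG over a column: the start value survives iff every entry equals it
theorem pvG_foldl (xs : List Int) (s : Int) :
    xs.foldl pvG s = if xs.all (fun x => x == s) then s else -1 := by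
  induction xs generalizing s with
  | nil => simp
  | cons x xs ih =>
    simp only [List.foldl_cons, List.all_cons]
    by_cases hx : x = s
    · simp [pvG, hx, ih]
    · simp only [pvG, ne_eq, hx, not_false_eq_true, if_true, ih]
      simp [hx]

-- A's row-major fold over equal-rank rows equals a column-wise map of cell folds
theorem foldl_zip_cols : ∀ (rest : List (List Int)) (d : List Int),
    (∀ v ∈ rest, v.length = d.length) →
    rest.foldl (fun d val => List.zipWith pvG d val) d
      = (List.range d.length).map (fun i => (rest.map (fun v => v.getD i 0)).foldl pvG (d.getD i 0)) := by
  intro rest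
  induction rest with
  | nil =>
    intro d _
    apply List.ext_getElem
    · simp
    · intro i h1 h2
      simp only [List.foldl_nil] at h1 ⊢
      simp [List.getD, List.getElem?_eq_getElem h1]
  | cons val rest ih =>
    intro d hlen
    have hv : val.length = d.length := hlen val (by simp)
    have hzl : (List.zipWith pvG d val).length = d.length := by simp [hv]
    simp only [List.foldl_cons]
    rw [ih _ (by intro v hv'; rw [hzl]; exact hlen v (by simp [hv']))]
    rw [hzl]
    apply List.map_congr_left
    intro i hi
    have hi' : i < d.length := List.mem_range.mp hi
    have hzg : (List.zipWith pvG d val).getD i 0 = pvG (d.getD i 0) (val.getD i 0) := by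
      simp [List.getD, hi', hv ▸ hi']
    simp only [List.map_cons, List.foldl_cons, hzg]

-- A's outer loop, under equal ranks, is a fold of the cellwise zip
theorem pvOuterA_foldl : ∀ (rest : List (List Int)) (ref d : List Int),
    d.length = ref.length → (∀ v ∈ rest, v.length = ref.length) →
    pvOuterA ref d rest = rest.foldl (fun d val => List.zipWith pvG d val) d := by
  intro rest
  induction rest with
  | nil => intro ref d _ _; rfl
  | cons val rest ih =>
    intro ref d hd hlen
    have hv : val.length = ref.length := hlen val (by simp)
    simp only [pvOuterA, hv, ne_eq, not_true_eq_false, if_false, List.foldl_cons]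
    have hinner : pvInnerA d val 0 = List.zipWith pvG d val := by
      have := pvInnerA_zip val [] d (by rw [hd, hv])
      simpa using this
    rw [hinner]
    exact ih ref _ (by simp [hv, hd]) (fun v hv' => hlen v (by simp [hv']))

-- ===== VERDICT (by name: the statement is the Claim_ definition above) =====
theorem merge_dynamic_dims_py_spec : Claim_equal_merge_dynamic_dims_py := by
  intro vl _ hpre
  unfold Spec_merge_dynamic_dims_py
  cases vl with
  | nil => rfl
  | cons ref rest =>
    have hlen : ∀ v ∈ rest, v.length = ref.length := by
      intro v hv
      have := hpre v (by simp [hv])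
      simpa using this
    simp only [merge_dynamic_dims_py, merge_dynamic_dims_py_alt]
    have hg : ¬ ((rest.any (fun v => v.length ≠ ref.length)) = true) := by
      simp only [List.any_eq_true, decide_eq_true_eq, not_exists, not_and, not_not]
      intro v hv
      exact hlen v hv
    rw [if_neg hg]
    rw [pvOuterA_foldl rest ref ref rfl hlen, foldl_zip_cols rest ref hlen]
    apply List.map_congr_left
    intro i hi
    rw [pvG_foldl]
    simp [List.all_map]
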